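-- pv_equiv track=rewrite | github.com/ikornaselur/advent-of-code | src/advent_of_code/year_2015/day_5/__init__.py | _has_repeat_one_letter_apart
-- ===== SOURCE A (Python) =====
-- def _has_repeat_one_letter_apart(string: str) -> bool:
--     if len(string) < 3:
--         return False
--
--     # idx is upper limit
--     idx = 2
--     while idx < len(string):
--         if string[idx - 2] == string[idx]:
--             return True
--         idx += 1
--
--     return False
-- ===== SOURCE B (Python) =====
-- def _has_repeat_one_letter_apart(string: str) -> bool:
--     positions = {}
--     for i, char in enumerate(string):
--         positions.setdefault(char, []).append(i)
--     return any(i + 2 in ps for ps in positions.values() for i in ps)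
-- ===== Notes on version B (the rewrite author's own statement) =====
-- stated objective: alternative
-- what changed: Instead of A's index-stepping scan comparing characters two apart, B first builds a dict mapping each character to the list of its positions in one enumerate pass, then answers by checking, inside each character's position list, whether some position p has p+2 present too.
import Mathlib
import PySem

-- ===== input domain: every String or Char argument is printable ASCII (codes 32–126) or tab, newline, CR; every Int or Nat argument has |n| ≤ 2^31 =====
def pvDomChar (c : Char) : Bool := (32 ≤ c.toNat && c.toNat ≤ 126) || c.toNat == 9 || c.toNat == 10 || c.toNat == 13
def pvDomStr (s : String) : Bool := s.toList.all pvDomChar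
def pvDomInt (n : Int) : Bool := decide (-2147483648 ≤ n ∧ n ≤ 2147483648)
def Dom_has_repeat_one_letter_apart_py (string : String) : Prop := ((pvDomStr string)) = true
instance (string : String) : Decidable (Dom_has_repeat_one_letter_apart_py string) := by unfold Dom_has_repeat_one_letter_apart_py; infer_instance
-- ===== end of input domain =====

-- B replaces A's index-stepping scan by a character→positions index built in one pass,
-- then looks for a position p with p+2 indexed under the same character (alternative; same result).

-- ===== PORT A =====
-- the 'while idx < len(string)' loop; indices idx-2 and idx are always in range, getD transcribes string[...]
def pvLoopA (cs : List Char) (idx : Nat) : Bool :=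
  if idx < cs.length then
    if cs.getD (idx - 2) ' ' == cs.getD idx ' ' then true
    else pvLoopA cs (idx + 1)
  else false
termination_by cs.length - idx

def has_repeat_one_letter_apart_py (string : String) : Bool :=
  let cs := string.toList
  if cs.length < 3 then false
  else pvLoopA cs 2

-- ===== PORT B =====
-- the 'for i, char in enumerate(string): positions.setdefault(char, []).append(i)' loop
def pvPositions (cs : List Char) : PySem.Dict Char (List Int) :=
  (PySem.List.enumerate cs 0).foldl (fun d p => d.modify p.2 [] (· ++ [p.1])) PySem.Dict.empty

-- any(i + 2 in ps for ps in positions.values() for i in ps)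
def has_repeat_one_letter_apart_py_alt (string : String) : Bool :=
  let positions := pvPositions string.toList
  positions.values.any (fun ps => ps.any (fun i => ps.contains (i + 2)))

-- ===== PRECONDITION & SPEC =====
def Spec_has_repeat_one_letter_apart_py (string : String) (out : Bool) : Prop := out = has_repeat_one_letter_apart_py_alt string
instance (string : String) (out : Bool) : Decidable (Spec_has_repeat_one_letter_apart_py string out) := by unfold Spec_has_repeat_one_letter_apart_py; infer_instance

-- ===== CLAIM (what is proved, stated in full; the proofs are below) =====
def Claim_equal_has_repeat_one_letter_apart_py : Prop := ∀ (string : String), Dom_has_repeat_one_letter_apart_py string → Spec_has_repeat_one_letter_apart_py string (has_repeat_one_letter_apart_py string)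

-- ===== LEMMAS AND PROOFS =====

-- the common characterisation: some position k has the same character two places later
def pvGood (cs : List Char) : Prop := ∃ k : Nat, k + 2 < cs.length ∧ cs[k]? = cs[k + 2]?

-- A's loop from position k+2 equals an 'any' over the zip of the two tails dropped at k and k+2.
theorem pvLoopA_eq_zip (cs : List Char) (k : Nat) :
    pvLoopA cs (k + 2) = ((cs.drop k).zip (cs.drop (k + 2))).any (fun p => p.1 == p.2) := by
  by_cases h : k + 2 < cs.length
  · have hk : k < cs.length := by omega
    rw [pvLoopA, List.drop_eq_getElem_cons hk, List.drop_eq_getElem_cons h]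
    simp only [h, if_pos, Nat.add_sub_cancel, List.getD_eq_getElem _ _ hk,
      List.getD_eq_getElem _ _ h, List.zip_cons_cons, List.any_cons]
    by_cases heq : cs[k] == cs[k + 2]
    · simp [heq]
    · simp only [heq, Bool.false_or]
      exact pvLoopA_eq_zip cs (k + 1)
  · rw [pvLoopA, if_neg h]
    have : cs.drop (k + 2) = [] := List.drop_eq_nil_of_le (by omega)
    simp [this]
termination_by cs.length - k

theorem pv_main (cs : List Char) :
    (if cs.length < 3 then false else pvLoopA cs 2) = (cs.zip (cs.drop 2)).any (fun p => p.1 == p.2) := by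
  by_cases h : cs.length < 3
  · rcases cs with _ | ⟨a, _ | ⟨b, _ | ⟨c, t⟩⟩⟩ <;> simp_all
    omega
  · have := pvLoopA_eq_zip cs 0
    simpa [h] using this

theorem pv_zip_any_iff (cs : List Char) :
    ((cs.zip (cs.drop 2)).any (fun p => p.1 == p.2) = true) ↔ pvGood cs := by
  simp only [List.any_eq_true, beq_iff_eq, pvGood]
  constructor
  · rintro ⟨p, hp, he⟩
    obtain ⟨i, hi, rfl⟩ := List.mem_iff_getElem.1 hp
    have hi' : i + 2 < cs.length := by
      simp [List.length_zip, List.length_drop] at hi; omega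
    refine ⟨i, hi', ?_⟩
    have h1 : i < cs.length := by omega
    rw [List.getElem?_eq_getElem h1, List.getElem?_eq_getElem hi']
    simpa [List.getElem_zip, List.getElem_drop, Nat.add_comm] using he
  · rintro ⟨k, hk, he⟩
    have hkz : k < ((cs.zip (cs.drop 2))).length := by
      simp [List.length_zip, List.length_drop]; omega
    refine ⟨(cs.zip (cs.drop 2))[k], List.getElem_mem hkz, ?_⟩
    have h1 : k < cs.length := by omega
    rw [List.getElem?_eq_getElem h1, List.getElem?_eq_getElem hk] at he
    simpa [List.getElem_zip, List.getElem_drop, Nat.add_comm] using Option.some.inj he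

-- membership in enumerate
theorem pv_mem_enumerate {α : Type} (xs : List α) (s : Int) (p : Int × α) :
    p ∈ PySem.List.enumerate xs s ↔ ∃ k : Nat, k < xs.length ∧ p.1 = s + k ∧ xs[k]? = some p.2 := by
  induction xs generalizing s with
  | nil => simp [PySem.List.enumerate_nil]
  | cons x t ih =>
    simp only [PySem.List.enumerate_cons, List.mem_cons, ih (s + 1)]
    constructor
    · rintro (rfl | ⟨k, hk, h1, h2⟩)
      · exact ⟨0, by simp⟩
      · exact ⟨k + 1, by simpa using hk, by push_cast; omega, by simpa using h2⟩
    · rintro ⟨k, hk, h1, h2⟩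
      cases k with
      | zero =>
        left
        simp only [List.getElem?_cons_zero, Option.some_inj] at h2
        obtain ⟨a, b⟩ := p
        simp_all
      | succ k =>
        right
        exact ⟨k, by simpa using hk, by push_cast at h1 ⊢; omega, by simpa using h2⟩

theorem pv_getD_positions (cs : List Char) (c : Char) :
    (pvPositions cs).getD c [] = ((PySem.List.enumerate cs 0).filter (fun p => p.2 == c)).map (·.1) := by
  have hfold : pvPositions cs
      = ((PySem.List.enumerate cs 0).map Prod.swap).foldl
          (fun d q => d.modify q.1 [] (· ++ [q.2])) PySem.Dict.empty := by
    rw [List.foldl_map]; rfl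
  rw [hfold, PySem.Dict.getD_foldl_modify_append]
  simp [List.filter_map, List.map_map, Function.comp_def, Prod.swap]

theorem pv_mem_positions (cs : List Char) (c : Char) (i : Int) :
    i ∈ (pvPositions cs).getD c [] ↔ ∃ k : Nat, k < cs.length ∧ i = (k : Int) ∧ cs[k]? = some c := by
  rw [pv_getD_positions]
  simp only [List.mem_map, List.mem_filter, beq_iff_eq]
  constructor
  · rintro ⟨p, ⟨hp, rfl⟩, rfl⟩
    obtain ⟨k, hk, h1, h2⟩ := (pv_mem_enumerate cs 0 p).1 hp
    exact ⟨k, hk, by omega, h2⟩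
  · rintro ⟨k, hk, rfl, h2⟩
    exact ⟨((k : Int), c), ⟨(pv_mem_enumerate cs 0 _).2 ⟨k, hk, by omega, h2⟩, rfl⟩, rfl⟩

theorem pv_keys_positions (cs : List Char) : (pvPositions cs).keys = PySem.Set.ofList cs := by
  unfold pvPositions
  rw [PySem.Dict.keys_foldl_modify_key]
  simp [PySem.List.map_snd_enumerate]
  rfl

theorem pv_nodup_keys_positions (cs : List Char) : (pvPositions cs).keys.Nodup := by
  unfold pvPositions
  exact PySem.Dict.nodup_keys_foldl_modify_key _ _ _ _ _ PySem.Dict.nodup_keys_empty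

theorem pv_B_iff (cs : List Char) :
    ((pvPositions cs).values.any (fun ps => ps.any (fun i => ps.contains (i + 2))) = true) ↔ pvGood cs := by
  constructor
  · intro h
    simp only [PySem.Dict.values, List.any_eq_true, List.mem_map] at h
    obtain ⟨ps, ⟨⟨⟨c, ps'⟩, hmem, rfl⟩, i, hi, hc⟩⟩ := h
    have hgd : (pvPositions cs).getD c [] = ps' :=
      PySem.Dict.getD_of_mem_items _ hmem (pv_nodup_keys_positions cs) []
    rw [← hgd] at hi hc
    have hi2 : (i + 2) ∈ (pvPositions cs).getD c [] := by
      simpa using (List.contains_iff_mem).1 hc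
    obtain ⟨k1, hk1, rfl, he1⟩ := (pv_mem_positions cs c _).1 hi
    obtain ⟨k2, hk2, hk12, he2⟩ := (pv_mem_positions cs c _).1 hi2
    have : k2 = k1 + 2 := by omega
    subst this
    exact ⟨k1, hk2, by rw [he1, he2]⟩
  · rintro ⟨k, hk, he⟩
    have h1 : k < cs.length := by omega
    set c := cs[k] with hc
    have he1 : cs[k]? = some c := List.getElem?_eq_getElem h1
    have he2 : cs[k + 2]? = some c := by rw [← he, he1]
    have hkeys : c ∈ (pvPositions cs).keys := by
      rw [pv_keys_positions]
      exact (PySem.Set.mem_ofList _ _).2 (List.getElem_mem h1)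
    have hcont : (pvPositions cs).contains c = true :=
      (PySem.Dict.contains_iff_mem_keys _ _).2 hkeys
    have hsome : ((pvPositions cs).get? c).isSome = true := by
      rw [← PySem.Dict.contains_eq_isSome_get? (pvPositions cs) c]; exact hcont
    obtain ⟨ps, hps⟩ := Option.isSome_iff_exists.mp hsome
    have hgd : (pvPositions cs).getD c [] = ps := PySem.Dict.getD_of_get?_eq_some _ [] hps
    have hmem1 : ((k : Int)) ∈ ps := by
      rw [← hgd]; exact (pv_mem_positions cs c _).2 ⟨k, h1, rfl, he1⟩
    have hmem2 : ((k : Int) + 2) ∈ ps := by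
      rw [← hgd]; exact (pv_mem_positions cs c _).2 ⟨k + 2, hk, by push_cast; ring, he2⟩
    simp only [PySem.Dict.values, List.any_eq_true, List.mem_map]
    exact ⟨ps, ⟨⟨(c, ps), PySem.Dict.mem_items_of_get?_eq_some _ hps, rfl⟩,
      (k : Int), hmem1, (List.contains_iff_mem).2 hmem2⟩⟩

-- ===== VERDICT (by name: the statement is the Claim_ definition above) =====
theorem has_repeat_one_letter_apart_py_spec : Claim_equal_has_repeat_one_letter_apart_py := by
  intro s _
  unfold Spec_has_repeat_one_letter_apart_py has_repeat_one_letter_apart_py has_repeat_one_letter_apart_py_alt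
  rw [Bool.eq_iff_iff]
  rw [show (let cs := s.toList; if cs.length < 3 then false else pvLoopA cs 2) = _ from pv_main s.toList]
  exact (pv_zip_any_iff s.toList).trans (pv_B_iff s.toList).symm
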